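-- pv_equiv track=rewrite | github.com/NoBrauni/EyeExpert_2 | embeddings.py | get_word_spans
-- ===== SOURCE A (Python) =====
-- def get_word_spans(sentence):
--     words = []
--     spans = []
--     start = 0
--
--     for word in sentence.split():
--         start = sentence.find(word, start)
--         end = start + len(word)
--         words.append(word)
--         spans.append((start, end))
--         start = end
--
--     return words, spans
-- ===== SOURCE B (Python) =====
-- def get_word_spans(sentence):
--     words = []
--     spans = []
--     cur = []
--     start = 0
--     for i, ch in enumerate(sentence):
--         if ch.isspace():
--             if cur:
--                 words.append(''.join(cur))
--                 spans.append((start, i))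
--                 cur = []
--         else:
--             if not cur:
--                 start = i
--             cur.append(ch)
--     if cur:
--         words.append(''.join(cur))
--         spans.append((start, len(sentence)))
--     return words, spans
-- ===== Notes on version B (the rewrite author's own statement) =====
-- stated objective: alternative
-- what changed: B computes words and spans in one forward character scan (whitespace-transition state machine) instead of calling split() and then re-locating each token with find(word, start).
import Mathlib
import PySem

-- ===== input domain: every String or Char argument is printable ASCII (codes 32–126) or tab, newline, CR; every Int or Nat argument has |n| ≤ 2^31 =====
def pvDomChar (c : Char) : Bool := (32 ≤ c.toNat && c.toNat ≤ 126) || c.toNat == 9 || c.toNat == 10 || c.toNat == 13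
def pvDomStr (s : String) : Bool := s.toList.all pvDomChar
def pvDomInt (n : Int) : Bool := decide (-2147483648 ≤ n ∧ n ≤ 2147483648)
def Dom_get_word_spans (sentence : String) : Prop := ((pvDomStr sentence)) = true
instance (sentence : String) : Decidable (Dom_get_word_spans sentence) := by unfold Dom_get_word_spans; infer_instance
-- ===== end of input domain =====

-- B replaces A's split()-then-find() re-location of each word by a single whitespace-transition
-- character scan (alternative decomposition); the two agree on every string.

-- ===== PORT A =====
-- A's strings are handled as char lists (PySem.Chars); words are rebuilt with String.ofList on return.
def get_word_spans (sentence : String) : List String × (List (Int × Int)) :=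
  let cs := sentence.toList
  let st := (PySem.Chars.split₀ cs).foldl
    (fun (acc : List (List Char) × List (Int × Int) × Int) word =>
      let start := PySem.Chars.findFrom cs word acc.2.2
      let e := start + (word.length : Int)
      (acc.1 ++ [word], acc.2.1 ++ [(start, e)], e))
    ([], [], 0)
  (st.1.map String.ofList, st.2.1)

-- ===== PORT B =====
-- Source B's loop: i is the enumerate index, cur the pending word chars, start where cur began.
def altGo : List Char → Nat → List Char → Nat → List (List Char) → List (Int × Int) →
    List (List Char) × List (Int × Int)
  | [], i, cur, start, words, spans =>
    if cur.isEmpty then (words, spans)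
    else (words ++ [cur], spans ++ [((start : Int), (i : Int))])
  | c :: rest, i, cur, start, words, spans =>
    if PySem.Chars.isspace c then
      if cur.isEmpty then altGo rest (i + 1) cur start words spans
      else altGo rest (i + 1) [] start (words ++ [cur]) (spans ++ [((start : Int), (i : Int))])
    else
      altGo rest (i + 1) (cur ++ [c]) (if cur.isEmpty then i else start) words spans

def get_word_spans_alt (sentence : String) : List String × (List (Int × Int)) :=
  let r := altGo sentence.toList 0 [] 0 [] []
  (r.1.map String.ofList, r.2)

-- ===== PRECONDITION & SPEC =====
def Spec_get_word_spans (sentence : String) (out : List String × (List (Int × Int))) : Prop := out = get_word_spans_alt sentence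
instance (sentence : String) (out : List String × (List (Int × Int))) : Decidable (Spec_get_word_spans sentence out) := by unfold Spec_get_word_spans; infer_instance

-- ===== CLAIM (what is proved, stated in full; the proofs are below) =====
def Claim_equal_get_word_spans : Prop := ∀ (sentence : String), Dom_get_word_spans sentence → Spec_get_word_spans sentence (get_word_spans sentence)

-- ===== LEMMAS AND PROOFS =====

theorem dropWhile_head_false {α : Type} (l : List α) (p : α → Bool) (c : α) (t' : List α) (h : l.dropWhile p = c :: t') : p c = false := by
  have hne : l.dropWhile p ≠ [] := by simp [h]
  have := List.head_dropWhile_not p (l := l) hne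
  simp [h] at this
  exact this

def toks (cs : List Char) (k : Nat) : List (List Char × Nat) :=
  let t := cs.dropWhile PySem.Chars.isspace
  if h : t = [] then []
  else
    let sp := cs.takeWhile PySem.Chars.isspace
    let w := t.takeWhile (fun c => !PySem.Chars.isspace c)
    let rest := t.dropWhile (fun c => !PySem.Chars.isspace c)
    (w, k + sp.length) :: toks rest (k + sp.length + w.length)
termination_by cs.length
decreasing_by
  obtain ⟨c, t', he⟩ := List.exists_cons_of_ne_nil h
  have he' : List.dropWhile PySem.Chars.isspace cs = c :: t' := he
  have hc : PySem.Chars.isspace c = false := dropWhile_head_false _ _ _ _ he'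
  have hw : (cs.dropWhile PySem.Chars.isspace).takeWhile (fun c => !PySem.Chars.isspace c) ≠ [] := by
    simp [he', hc]
  have h1 : ((cs.dropWhile PySem.Chars.isspace).takeWhile (fun c => !PySem.Chars.isspace c)).length
      + ((cs.dropWhile PySem.Chars.isspace).dropWhile (fun c => !PySem.Chars.isspace c)).length
      = (cs.dropWhile PySem.Chars.isspace).length := by
    simp [← List.length_append, List.takeWhile_append_dropWhile]
  have h2 : (cs.dropWhile PySem.Chars.isspace).length ≤ cs.length := List.length_dropWhile_le _ _
  have h3 : 0 < ((cs.dropWhile PySem.Chars.isspace).takeWhile (fun c => !PySem.Chars.isspace c)).length :=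
    List.length_pos_iff.mpr hw
  omega

def wordsOf (L : List (List Char × Nat)) : List (List Char) := L.map (·.1)
def spansOf (L : List (List Char × Nat)) : List (Int × Int) :=
  L.map (fun p => ((p.2 : Int), ((p.2 + p.1.length : Nat) : Int)))
def lastEnd (L : List (List Char × Nat)) (k : Nat) : Nat :=
  L.foldl (fun _ p => p.2 + p.1.length) k

theorem toks_nil (cs : List Char) (k : Nat) (h : cs.dropWhile PySem.Chars.isspace = []) :
    toks cs k = [] := by
  rw [toks]; simp [h]

theorem toks_cons (cs : List Char) (k : Nat) (h : cs.dropWhile PySem.Chars.isspace ≠ []) :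
    toks cs k = ((cs.dropWhile PySem.Chars.isspace).takeWhile (fun c => !PySem.Chars.isspace c),
        k + (cs.takeWhile PySem.Chars.isspace).length) ::
      toks ((cs.dropWhile PySem.Chars.isspace).dropWhile (fun c => !PySem.Chars.isspace c))
        (k + (cs.takeWhile PySem.Chars.isspace).length
          + ((cs.dropWhile PySem.Chars.isspace).takeWhile (fun c => !PySem.Chars.isspace c)).length) := by
  conv_lhs => rw [toks]
  simp [h]

-- ===== B side =====
theorem altGo_spaces (sp : List Char) (hsp : ∀ c ∈ sp, PySem.Chars.isspace c = true) :
    ∀ (rest : List Char) (i start : Nat) (W : List (List Char)) (S : List (Int × Int)),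
    altGo (sp ++ rest) i [] start W S = altGo rest (i + sp.length) [] start W S := by
  induction sp with
  | nil => intro rest i start W S; simp
  | cons c sp' ih =>
    intro rest i start W S
    have hc : PySem.Chars.isspace c = true := hsp c (by simp)
    have harr : i + (c :: sp').length = (i + 1) + sp'.length := by simp; omega
    rw [harr]
    simp only [List.cons_append, altGo, hc, if_true, List.isEmpty_nil]
    exact ih (fun c hc => hsp c (by simp [hc])) rest (i + 1) start W S

theorem altGo_word (w : List Char) (hw : ∀ c ∈ w, PySem.Chars.isspace c = false) :
    ∀ (rest : List Char) (i start : Nat) (cur : List Char), cur ≠ [] →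
    ∀ (W : List (List Char)) (S : List (Int × Int)),
    altGo (w ++ rest) i cur start W S = altGo rest (i + w.length) (cur ++ w) start W S := by
  induction w with
  | nil => intro rest i start cur _ W S; simp
  | cons c w' ih =>
    intro rest i start cur hcur W S
    have hc : PySem.Chars.isspace c = false := hw c (by simp)
    have hcure : cur.isEmpty = false := by simp [hcur]
    have harr : i + (c :: w').length = (i + 1) + w'.length := by simp; omega
    have hlst : cur ++ c :: w' = (cur ++ [c]) ++ w' := by simp
    rw [harr, hlst]
    simp only [List.cons_append, altGo, hc, Bool.false_eq_true, if_false, hcure]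
    exact ih (fun c hc => hw c (by simp [hc])) rest (i + 1) start (cur ++ [c]) (by simp) W S

theorem altGo_flush (rest : List Char) (i start : Nat) (cur : List Char) (hcur : cur ≠ [])
    (h : rest = [] ∨ ∃ d r', rest = d :: r' ∧ PySem.Chars.isspace d = true)
    (W : List (List Char)) (S : List (Int × Int)) :
    altGo rest i cur start W S
      = altGo rest i [] start (W ++ [cur]) (S ++ [((start : Int), (i : Int))]) := by
  have hcure : cur.isEmpty = false := by simp [hcur]
  rcases h with h | ⟨d, r', he, hd⟩
  · simp [h, altGo, hcure]
  · simp [he, altGo, hd, hcure]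

theorem B_main (cs : List Char) (k : Nat) :
    ∀ (start : Nat) (W : List (List Char)) (S : List (Int × Int)),
    altGo cs k [] start W S = (W ++ wordsOf (toks cs k), S ++ spansOf (toks cs k)) := by
  induction cs, k using toks.induct with
  | case1 cs k t ht =>
    intro start W S
    have ht' : List.dropWhile PySem.Chars.isspace cs = [] := ht
    have hsp : ∀ c ∈ cs.takeWhile PySem.Chars.isspace, PySem.Chars.isspace c = true :=
      fun c hc => List.mem_takeWhile_imp hc
    have hcs : cs = cs.takeWhile PySem.Chars.isspace ++ [] := by
      conv_lhs => rw [← List.takeWhile_append_dropWhile (p := PySem.Chars.isspace) (l := cs)]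
      rw [ht']
    conv_lhs => rw [hcs]
    rw [altGo_spaces _ hsp, toks_nil cs k ht']
    simp [altGo, wordsOf, spansOf]
  | case2 cs k t ht sp w rest ih =>
    intro start W S
    have ht' : List.dropWhile PySem.Chars.isspace cs ≠ [] := ht
    obtain ⟨c, t', he⟩ := List.exists_cons_of_ne_nil ht
    have he' : List.dropWhile PySem.Chars.isspace cs = c :: t' := he
    have hc : PySem.Chars.isspace c = false := dropWhile_head_false _ _ _ _ he'
    have hwc : (List.dropWhile PySem.Chars.isspace cs).takeWhile (fun c => !PySem.Chars.isspace c)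
        = c :: t'.takeWhile (fun c => !PySem.Chars.isspace c) := by
      rw [he']; simp [hc]
    have hwns : ∀ x ∈ (List.dropWhile PySem.Chars.isspace cs).takeWhile (fun c => !PySem.Chars.isspace c),
        PySem.Chars.isspace x = false := by
      intro x hx
      have := List.mem_takeWhile_imp hx
      simpa using this
    have hsp : ∀ x ∈ cs.takeWhile PySem.Chars.isspace, PySem.Chars.isspace x = true :=
      fun x hx => List.mem_takeWhile_imp hx
    have hcs : cs = cs.takeWhile PySem.Chars.isspace
        ++ ((List.dropWhile PySem.Chars.isspace cs).takeWhile (fun c => !PySem.Chars.isspace c)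
          ++ (List.dropWhile PySem.Chars.isspace cs).dropWhile (fun c => !PySem.Chars.isspace c)) := by
      rw [List.takeWhile_append_dropWhile, List.takeWhile_append_dropWhile]
    have hrest : (List.dropWhile PySem.Chars.isspace cs).dropWhile (fun c => !PySem.Chars.isspace c) = []
        ∨ ∃ d r', (List.dropWhile PySem.Chars.isspace cs).dropWhile (fun c => !PySem.Chars.isspace c) = d :: r'
            ∧ PySem.Chars.isspace d = true := by
      rcases hre : (List.dropWhile PySem.Chars.isspace cs).dropWhile (fun c => !PySem.Chars.isspace c) with _ | ⟨d, r'⟩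
      · exact Or.inl rfl
      · refine Or.inr ⟨d, r', rfl, ?_⟩
        have := dropWhile_head_false _ _ _ _ hre
        simpa using this
    set SP := cs.takeWhile PySem.Chars.isspace with hSP
    set WW := (List.dropWhile PySem.Chars.isspace cs).takeWhile (fun c => !PySem.Chars.isspace c) with hWW
    set RR := (List.dropWhile PySem.Chars.isspace cs).dropWhile (fun c => !PySem.Chars.isspace c) with hRR
    have hWne : WW ≠ [] := by rw [hwc]; simp
    calc altGo cs k [] start W S
        = altGo (WW ++ RR) (k + SP.length) [] start W S := by
          conv_lhs => rw [hcs]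
          rw [altGo_spaces _ hsp]
      _ = altGo RR (k + SP.length + WW.length) WW (k + SP.length) W S := by
          rw [hwc]
          simp only [List.cons_append, altGo, hc, Bool.false_eq_true, if_false,
            List.isEmpty_nil, if_true, List.nil_append]
          rw [altGo_word _ (fun x hx => hwns x (by rw [hwc]; simp [hx])) RR _ _ [c] (by simp)]
          have h1 : k + SP.length + 1 + (List.takeWhile (fun c => !PySem.Chars.isspace c) t').length
              = k + SP.length + WW.length := by rw [hwc]; simp; omega
          have h2 : [c] ++ List.takeWhile (fun c => !PySem.Chars.isspace c) t' = WW := by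
            rw [hwc]; simp
          rw [h1, h2]
          rw [← hwc]
      _ = altGo RR (k + SP.length + WW.length) [] (k + SP.length)
            (W ++ [WW]) (S ++ [(((k + SP.length : Nat) : Int), ((k + SP.length + WW.length : Nat) : Int))]) := by
          rw [altGo_flush RR _ _ WW hWne hrest]
      _ = (W ++ wordsOf (toks cs k), S ++ spansOf (toks cs k)) := by
          rw [ih, toks_cons cs k ht']
          simp only [wordsOf, spansOf, List.map_cons, List.append_assoc, List.singleton_append,
            Prod.mk.injEq, List.cons.injEq]
          and_intros <;> rfl

-- ===== A side =====
theorem splitGo_acc : ∀ (l cur : List Char) (acc : List (List Char)),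
    PySem.Chars.split₀.go l cur acc = acc.reverse ++ PySem.Chars.split₀.go l cur [] := by
  intro l
  induction l with
  | nil =>
    intro cur acc
    by_cases h : cur.isEmpty <;> simp [PySem.Chars.split₀.go, h]
  | cons c rest ih =>
    intro cur acc
    by_cases hs : PySem.Chars.isspace c = true
    · simp only [PySem.Chars.split₀.go, hs, if_true]
      by_cases h : cur.isEmpty = true
      · simp only [h, if_true]
        exact ih [] acc
      · simp only [h, Bool.false_eq_true, if_false]
        rw [ih [] (cur.reverse :: acc), ih [] [cur.reverse]]
        simp
    · simp only [PySem.Chars.split₀.go, hs, if_false]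
      exact ih (c :: cur) acc

theorem splitGo_spaces (sp : List Char) (hsp : ∀ c ∈ sp, PySem.Chars.isspace c = true) :
    ∀ (rest : List Char) (acc : List (List Char)),
    PySem.Chars.split₀.go (sp ++ rest) [] acc = PySem.Chars.split₀.go rest [] acc := by
  induction sp with
  | nil => intro rest acc; simp
  | cons c sp' ih =>
    intro rest acc
    have hc : PySem.Chars.isspace c = true := hsp c (by simp)
    simp only [List.cons_append, PySem.Chars.split₀.go, hc, if_true, List.isEmpty_nil]
    exact ih (fun c hc => hsp c (by simp [hc])) rest acc

theorem splitGo_word (w : List Char) (hw : ∀ c ∈ w, PySem.Chars.isspace c = false) :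
    ∀ (rest cur : List Char) (acc : List (List Char)),
    PySem.Chars.split₀.go (w ++ rest) cur acc = PySem.Chars.split₀.go rest (w.reverse ++ cur) acc := by
  induction w with
  | nil => intro rest cur acc; simp
  | cons c w' ih =>
    intro rest cur acc
    have hc : PySem.Chars.isspace c = false := hw c (by simp)
    simp only [List.cons_append, PySem.Chars.split₀.go, hc, Bool.false_eq_true, if_false]
    rw [ih (fun c hc => hw c (by simp [hc])) rest (c :: cur) acc]
    congr 1
    simp

theorem split_nil (cs : List Char) (h : cs.dropWhile PySem.Chars.isspace = []) :
    PySem.Chars.split₀ cs = [] := by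
  have hsp : ∀ c ∈ cs.takeWhile PySem.Chars.isspace, PySem.Chars.isspace c = true :=
    fun c hc => List.mem_takeWhile_imp hc
  have hcs : cs = cs.takeWhile PySem.Chars.isspace ++ [] := by
    conv_lhs => rw [← List.takeWhile_append_dropWhile (p := PySem.Chars.isspace) (l := cs)]
    rw [h]
  show PySem.Chars.split₀.go cs [] [] = []
  conv_lhs => rw [hcs]
  rw [splitGo_spaces _ hsp]
  simp [PySem.Chars.split₀.go]

theorem split_cons (cs : List Char) (h : cs.dropWhile PySem.Chars.isspace ≠ []) :
    PySem.Chars.split₀ cs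
      = (cs.dropWhile PySem.Chars.isspace).takeWhile (fun c => !PySem.Chars.isspace c)
        :: PySem.Chars.split₀ ((cs.dropWhile PySem.Chars.isspace).dropWhile (fun c => !PySem.Chars.isspace c)) := by
  obtain ⟨c, t', he⟩ := List.exists_cons_of_ne_nil h
  have hc : PySem.Chars.isspace c = false := dropWhile_head_false _ _ _ _ he
  have hwns : ∀ x ∈ (List.dropWhile PySem.Chars.isspace cs).takeWhile (fun c => !PySem.Chars.isspace c),
      PySem.Chars.isspace x = false := by
    intro x hx
    have := List.mem_takeWhile_imp hx
    simpa using this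
  have hsp : ∀ x ∈ cs.takeWhile PySem.Chars.isspace, PySem.Chars.isspace x = true :=
    fun x hx => List.mem_takeWhile_imp hx
  set SP := cs.takeWhile PySem.Chars.isspace with hSP
  set WW := (List.dropWhile PySem.Chars.isspace cs).takeWhile (fun c => !PySem.Chars.isspace c) with hWW
  set RR := (List.dropWhile PySem.Chars.isspace cs).dropWhile (fun c => !PySem.Chars.isspace c) with hRR
  have hWne : WW ≠ [] := by rw [hWW, he]; simp [hc]
  have hcs : cs = SP ++ (WW ++ RR) := by
    rw [hSP, hWW, hRR, List.takeWhile_append_dropWhile, List.takeWhile_append_dropWhile]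
  show PySem.Chars.split₀.go cs [] [] = WW :: PySem.Chars.split₀.go RR [] []
  conv_lhs => rw [hcs]
  rw [splitGo_spaces _ hsp, splitGo_word WW hwns RR [] []]
  rcases hre : RR with _ | ⟨d, r'⟩
  · have hem : WW.reverse.isEmpty = false := by simp [hWne]
    simp [PySem.Chars.split₀.go, hem]
  · have hd : PySem.Chars.isspace d = true := by
      have := dropWhile_head_false _ _ _ _ (hRR ▸ hre)
      simpa using this
    have hem : WW.reverse.isEmpty = false := by simp [hWne]
    simp only [List.append_nil, PySem.Chars.split₀.go, hd, if_true, hem, Bool.false_eq_true,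
      if_false, List.isEmpty_nil]
    rw [splitGo_acc r' [] [WW.reverse.reverse], splitGo_acc r' [] []]
    simp

theorem find_token (sp w rest : List Char) (hsp : ∀ x ∈ sp, PySem.Chars.isspace x = true)
    (c : Char) (w' : List Char) (hwc : w = c :: w') (hc : PySem.Chars.isspace c = false) :
    PySem.Chars.find (sp ++ (w ++ rest)) w = (sp.length : Int) := by
  have hocc : w <+: (sp ++ (w ++ rest)).drop sp.length := by
    rw [List.drop_left]
    exact List.prefix_append w rest
  have hinf : w <:+: sp ++ (w ++ rest) := ⟨sp, rest, by simp⟩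
  have h0 : 0 ≤ PySem.Chars.find (sp ++ (w ++ rest)) w :=
    (PySem.Chars.find_nonneg_iff _ _).mpr hinf
  obtain ⟨hpre, hmin⟩ := PySem.Chars.find_spec h0
  have hle : (PySem.Chars.find (sp ++ (w ++ rest)) w).toNat ≤ sp.length := by
    by_contra hgt
    exact hmin sp.length (by omega) hocc
  have hge : sp.length ≤ (PySem.Chars.find (sp ++ (w ++ rest)) w).toNat := by
    by_contra hlt
    push_neg at hlt
    set j := (PySem.Chars.find (sp ++ (w ++ rest)) w).toNat with hj
    have hjlen : j < sp.length := hlt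
    have hdrop : (sp ++ (w ++ rest)).drop j = sp[j] :: (sp.drop (j + 1) ++ (w ++ rest)) := by
      rw [List.drop_append_of_le_length (by omega)]
      conv_lhs => rw [List.drop_eq_getElem_cons hjlen]
      rfl
    rw [hdrop, hwc] at hpre
    obtain ⟨tl, htl⟩ := hpre
    have : c = sp[j] := by
      have := htl
      simp only [List.cons_append] at this
      exact ((List.cons.inj this.symm).1).symm
    have hspj : PySem.Chars.isspace sp[j] = true := hsp _ (List.getElem_mem hjlen)
    rw [← this, hc] at hspj
    exact absurd hspj (by simp)
  omega

theorem findFrom_token (cs : List Char) (k : Nat) (sp w rest : List Char)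
    (hk : k ≤ cs.length) (hdrop : cs.drop k = sp ++ (w ++ rest))
    (hsp : ∀ x ∈ sp, PySem.Chars.isspace x = true)
    (c : Char) (w' : List Char) (hwc : w = c :: w') (hc : PySem.Chars.isspace c = false) :
    PySem.Chars.findFrom cs w (k : Int) = ((k + sp.length : Nat) : Int) := by
  rw [PySem.Chars.findFrom_natCast cs w k hk, hdrop,
    find_token sp w rest hsp c w' hwc hc]
  have h1 : (sp.length : Int) ≠ -1 := by omega
  simp only [h1, if_false]
  push_cast
  ring

theorem A_main (cs : List Char) (cs' : List Char) (k : Nat) :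
    cs' = cs.drop k →
    ∀ (W : List (List Char)) (S : List (Int × Int)),
    (PySem.Chars.split₀ cs').foldl
      (fun (acc : List (List Char) × List (Int × Int) × Int) word =>
        let start := PySem.Chars.findFrom cs word acc.2.2
        let e := start + (word.length : Int)
        (acc.1 ++ [word], acc.2.1 ++ [(start, e)], e))
      (W, S, (k : Int))
      = (W ++ wordsOf (toks cs' k), S ++ spansOf (toks cs' k),
         ((lastEnd (toks cs' k) k : Nat) : Int)) := by
  induction cs', k using toks.induct with
  | case1 cs' k t ht =>
    intro _ W S
    have ht' : List.dropWhile PySem.Chars.isspace cs' = [] := ht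
    rw [split_nil cs' ht', toks_nil cs' k ht']
    simp [wordsOf, spansOf, lastEnd]
  | case2 cs' k t ht sp w rest ih =>
    intro hdk W S
    have ht' : List.dropWhile PySem.Chars.isspace cs' ≠ [] := ht
    obtain ⟨c, t', he⟩ := List.exists_cons_of_ne_nil ht
    have he' : List.dropWhile PySem.Chars.isspace cs' = c :: t' := he
    have hc : PySem.Chars.isspace c = false := dropWhile_head_false _ _ _ _ he'
    have hwc : (List.dropWhile PySem.Chars.isspace cs').takeWhile (fun c => !PySem.Chars.isspace c)
        = c :: t'.takeWhile (fun c => !PySem.Chars.isspace c) := by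
      rw [he']; simp [hc]
    have hsp : ∀ x ∈ cs'.takeWhile PySem.Chars.isspace, PySem.Chars.isspace x = true :=
      fun x hx => List.mem_takeWhile_imp hx
    set SP := cs'.takeWhile PySem.Chars.isspace with hSP
    set WW := (List.dropWhile PySem.Chars.isspace cs').takeWhile (fun c => !PySem.Chars.isspace c) with hWW
    set RR := (List.dropWhile PySem.Chars.isspace cs').dropWhile (fun c => !PySem.Chars.isspace c) with hRR
    have hcs : cs' = SP ++ (WW ++ RR) := by
      rw [hSP, hWW, hRR, List.takeWhile_append_dropWhile, List.takeWhile_append_dropWhile]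
    have hne : cs' ≠ [] := by
      intro h0
      rw [h0] at he'
      simp at he'
    have hk : k ≤ cs.length := by
      have : cs.drop k ≠ [] := by rw [← hdk]; exact hne
      have := List.length_lt_of_drop_ne_nil this
      omega
    have hdrop : cs.drop k = SP ++ (WW ++ RR) := by rw [← hdk]; exact hcs
    have hff : PySem.Chars.findFrom cs WW (k : Int) = ((k + SP.length : Nat) : Int) :=
      findFrom_token cs k SP WW RR hk hdrop hsp c _ hwc hc
    have hRRdrop : RR = cs.drop (k + SP.length + WW.length) := by
      have h1 : cs.drop (k + SP.length + WW.length) = (cs.drop k).drop (SP.length + WW.length) := by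
        rw [List.drop_drop]
        congr 1
        omega
      rw [h1, hdrop, ← List.append_assoc]
      have h2 : SP.length + WW.length = (SP ++ WW).length := by simp
      rw [h2, List.drop_left]
    rw [split_cons cs' ht']
    rw [List.foldl_cons]
    simp only [← hWW, ← hRR]
    have harg : (let start := PySem.Chars.findFrom cs WW ((W, S, ((k : Nat) : Int)).2.2)
                 let e := start + (WW.length : Int)
                 ((W, S, ((k : Nat) : Int)).1 ++ [WW], (W, S, ((k : Nat) : Int)).2.1 ++ [(start, e)], e))
        = (W ++ [WW], S ++ [(((k + SP.length : Nat) : Int), ((k + SP.length + WW.length : Nat) : Int))],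
           ((k + SP.length + WW.length : Nat) : Int)) := by
      show (W ++ [WW], S ++ [(PySem.Chars.findFrom cs WW ((k : Nat) : Int),
          PySem.Chars.findFrom cs WW ((k : Nat) : Int) + (WW.length : Int))],
          PySem.Chars.findFrom cs WW ((k : Nat) : Int) + (WW.length : Int)) = _
      rw [hff]
      push_cast
      ring_nf
    rw [harg, ih hRRdrop]
    rw [toks_cons cs' k ht']
    simp only [wordsOf, spansOf, lastEnd, List.map_cons, List.foldl_cons, List.append_assoc,
      List.singleton_append, Prod.mk.injEq]
    and_intros <;> rfl

theorem AB_eq (sentence : String) : get_word_spans sentence = get_word_spans_alt sentence := by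
  simp only [get_word_spans, get_word_spans_alt]
  rw [B_main sentence.toList 0 0 [] []]
  have hA := A_main sentence.toList sentence.toList 0 (by simp) [] []
  simp only [Nat.cast_zero] at hA
  rw [hA]

-- ===== VERDICT (by name: the statement is the Claim_ definition above) =====
theorem get_word_spans_spec : Claim_equal_get_word_spans := by
  intro sentence _
  unfold Spec_get_word_spans
  exact AB_eq sentence
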